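-- pv_equiv track=rewrite | github.com/Tom-K64/Solved-Problems | CODECHEF/C71_CC_CS2023_STK.py | count_streak
-- ===== SOURCE A (Python) =====
-- def count_streak(lst):
--     count=0
--     streak=[]
--     for i in lst:
--         if i==0:
--             streak.append(count)
--             count=0
--         else:
--             count+=1
--     streak.append(count)
--     return max(streak)
-- ===== SOURCE B (Python) =====
-- from itertools import groupby
--
-- def count_streak(lst):
--     return max((sum(1 for _ in g) for k, g in groupby(lst, key=lambda x: x == 0) if not k), default=0)
-- ===== Notes on version B (the rewrite author's own statement) =====
-- stated objective: idiomatic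
-- what changed: Replaces A's manual counter-plus-streak-list loop (append count on each zero, then max) by an itertools.groupby decomposition: group the list into maximal runs keyed by x == 0 and take the max length of the non-zero runs with default=0.
import Mathlib
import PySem

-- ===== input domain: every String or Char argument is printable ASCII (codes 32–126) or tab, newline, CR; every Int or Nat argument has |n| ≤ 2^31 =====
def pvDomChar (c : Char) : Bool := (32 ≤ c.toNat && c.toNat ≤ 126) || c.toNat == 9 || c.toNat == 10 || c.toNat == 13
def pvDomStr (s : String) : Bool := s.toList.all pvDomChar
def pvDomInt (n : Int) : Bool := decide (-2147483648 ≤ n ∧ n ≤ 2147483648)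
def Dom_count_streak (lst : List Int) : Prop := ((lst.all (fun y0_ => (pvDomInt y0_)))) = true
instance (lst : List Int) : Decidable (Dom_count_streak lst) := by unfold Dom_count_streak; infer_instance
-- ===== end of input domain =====

-- B replaces A's manual counter-and-list loop by an itertools.groupby decomposition:
-- group the list into maximal runs by (x == 0) and take the max length of the non-zero
-- runs with default 0 (objective: idiomatic; same return value on every input).

-- ===== PORT A =====
-- A's loop: state (count, streak); on 0 append count and reset, else count += 1;
-- finally append count and return max(streak) (the list is never empty, so the
-- `.getD 0` totality default is never used).
def count_streak (lst : List Int) : Int :=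
  let p := lst.foldl
    (fun (s : Int × List Int) i => if i == 0 then (0, s.2 ++ [s.1]) else (s.1 + 1, s.2))
    (0, [])
  (PySem.List.max? (p.2 ++ [p.1]) (fun y => y)).getD 0

-- ===== PORT B =====
-- itertools.groupby(lst, key=lambda x: x == 0): maximal runs with their key.
def pyGroups : List Int → List (Bool × List Int)
  | [] => []
  | x :: xs =>
    ((x == 0), x :: xs.takeWhile (fun y => (y == 0) == (x == 0))) ::
      pyGroups (xs.dropWhile (fun y => (y == 0) == (x == 0)))
termination_by l => l.length
decreasing_by
  exact Nat.lt_succ_of_le (List.length_dropWhile_le _ _)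

-- max((sum(1 for _ in g) for k, g in groupby(...) if not k), default=0)
def count_streak_alt (lst : List Int) : Int :=
  PySem.List.maxD
    ((pyGroups lst).filterMap (fun g => if g.1 then none else some ((g.2.length : Int))))
    (fun y => y) 0

-- ===== PRECONDITION & SPEC =====
def Spec_count_streak (lst : List Int) (out : Int) : Prop := out = count_streak_alt lst
instance (lst : List Int) (out : Int) : Decidable (Spec_count_streak lst out) := by unfold Spec_count_streak; infer_instance

-- ===== CLAIM (what is proved, stated in full; the proofs are below) =====
def Claim_equal_count_streak : Prop := ∀ (lst : List Int), Dom_count_streak lst → Spec_count_streak lst (count_streak lst)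

-- ===== LEMMAS AND PROOFS =====

-- final count of A's loop
def gC : List Int → Int → Int
  | [], c => c
  | x :: xs, c => if x = 0 then gC xs 0 else gC xs (c + 1)

-- streak list appended by A's loop
def gS : List Int → Int → List Int
  | [], _ => []
  | x :: xs, c => if x = 0 then c :: gS xs 0 else gS xs (c + 1)

-- the longest streak, starting with a running count of c
def g : List Int → Int → Int
  | [], c => c
  | x :: xs, c => if x = 0 then max c (g xs 0) else g xs (c + 1)

theorem foldA_eq (lst : List Int) : ∀ (c : Int) (s : List Int),
    lst.foldl
      (fun (s : Int × List Int) i => if i == 0 then (0, s.2 ++ [s.1]) else (s.1 + 1, s.2))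
      (c, s) = (gC lst c, s ++ gS lst c) := by
  induction lst with
  | nil => intro c s; simp [gC, gS]
  | cons x xs ih =>
    intro c s
    simp only [List.foldl_cons]
    by_cases h : x = 0
    · rw [if_pos (by simpa using h), ih 0 (s ++ [c])]
      simp [gC, gS, h]
    · rw [if_neg (by simpa using h), ih (c + 1) s]
      simp [gC, gS, h]

theorem foldl_max_max (L : List Int) : ∀ (a b : Int),
    L.foldl max (max a b) = max a (L.foldl max b) := by
  induction L with
  | nil => intro a b; simp
  | cons x t ih =>
    intro a b
    simp only [List.foldl_cons]
    rw [max_assoc, ih]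

theorem g_nonneg (lst : List Int) : ∀ c : Int, 0 ≤ c → 0 ≤ g lst c := by
  induction lst with
  | nil => intro c hc; simpa [g] using hc
  | cons x xs ih =>
    intro c hc
    by_cases h : x = 0
    · simp only [g, if_pos h]
      exact le_max_of_le_right (ih 0 le_rfl)
    · simp only [g, if_neg h]
      exact ih (c + 1) (by omega)

theorem gC_nonneg (lst : List Int) : ∀ c : Int, 0 ≤ c → 0 ≤ gC lst c := by
  induction lst with
  | nil => intro c hc; simpa [gC] using hc
  | cons x xs ih =>
    intro c hc
    by_cases h : x = 0
    · simp only [gC, if_pos h]; exact ih 0 le_rfl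
    · simp only [gC, if_neg h]; exact ih (c + 1) (by omega)

theorem gS_nonneg (lst : List Int) : ∀ c : Int, 0 ≤ c → ∀ y ∈ gS lst c, 0 ≤ y := by
  induction lst with
  | nil => intro c _ y hy; simp [gS] at hy
  | cons x xs ih =>
    intro c hc y hy
    by_cases h : x = 0
    · rw [gS, if_pos h] at hy
      rcases List.mem_cons.mp hy with rfl | hy
      · exact hc
      · exact ih 0 le_rfl y hy
    · rw [gS, if_neg h] at hy
      exact ih (c + 1) (by omega) y hy

theorem A_char (lst : List Int) : ∀ c : Int, 0 ≤ c →
    (gS lst c ++ [gC lst c]).foldl max 0 = g lst c := by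
  induction lst with
  | nil => intro c hc; simp [gS, gC, g]; omega
  | cons x xs ih =>
    intro c hc
    by_cases h : x = 0
    · rw [gS, gC, g, if_pos h, if_pos h, if_pos h]
      rw [List.cons_append, List.foldl_cons, max_comm (0 : Int) c, foldl_max_max,
        ih 0 le_rfl]
    · rw [gS, gC, g, if_neg h, if_neg h, if_neg h]
      exact ih (c + 1) (by omega)

theorem maxD_eq_foldl0 (L : List Int) (hL : ∀ y ∈ L, 0 ≤ y) :
    PySem.List.maxD L (fun y => y) 0 = L.foldl max 0 := by
  cases L with
  | nil => simp [PySem.List.maxD, PySem.List.max?]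
  | cons x t =>
    have hx : 0 ≤ x := hL x (by simp)
    simp [PySem.List.maxD, PySem.List.max?_id_cons, max_eq_right hx]

theorem max?getD_eq_foldl0 (L : List Int) (hL : ∀ y ∈ L, 0 ≤ y) :
    (PySem.List.max? L (fun y => y)).getD 0 = L.foldl max 0 := by
  cases L with
  | nil => simp [PySem.List.max?]
  | cons x t =>
    have hx : 0 ≤ x := hL x (by simp)
    simp [PySem.List.max?_id_cons, max_eq_right hx]

theorem head_dropWhile {α : Type} (p : α → Bool) (xs : List α) :
    ∀ y ys, xs.dropWhile p = y :: ys → p y = false := by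
  induction xs with
  | nil => intro y ys h; simp [List.dropWhile] at h
  | cons x xs ih =>
    intro y ys h
    by_cases hp : p x
    · rw [List.dropWhile_cons_of_pos hp] at h; exact ih y ys h
    · rw [List.dropWhile_cons_of_neg hp] at h
      cases h; simpa using hp

-- a run of zeros at the front does not change the longest streak from 0
theorem g_zero_run (t : List Int) (ht : ∀ y ∈ t, y = 0) (rest : List Int) :
    g (t ++ rest) 0 = g rest 0 := by
  induction t with
  | nil => simp
  | cons x t ih =>
    have hx : x = 0 := ht x (by simp)
    have ht' : ∀ y ∈ t, y = 0 := fun y hy => ht y (by simp [hy])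
    rw [List.cons_append, g, if_pos hx, ih ht']
    exact max_eq_right (g_nonneg rest 0 le_rfl)

-- a run of non-zeros at the front just advances the count
theorem g_nonzero_run (t : List Int) (ht : ∀ y ∈ t, y ≠ 0) : ∀ (rest : List Int) (c : Int),
    g (t ++ rest) c = g rest (c + t.length) := by
  induction t with
  | nil => intro rest c; simp
  | cons x t ih =>
    intro rest c
    have hx : x ≠ 0 := ht x (by simp)
    have ht' : ∀ y ∈ t, y ≠ 0 := fun y hy => ht y (by simp [hy])
    rw [List.cons_append, g, if_neg hx, ih ht']
    congr 1
    simp only [List.length_cons]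
    push_cast
    ring

-- after a non-zero run, the rest starts with 0 (or is empty): the count splits off the max
theorem g_split (d : List Int) (hd : d = [] ∨ ∃ y ys, d = y :: ys ∧ y = 0)
    (n : Int) (hn : 0 ≤ n) : g d n = max n (g d 0) := by
  rcases hd with rfl | ⟨y, ys, rfl, rfl⟩
  · simp [g]; omega
  · rw [g, g, if_pos rfl, if_pos rfl]
    rw [max_eq_right (g_nonneg ys 0 le_rfl)]

theorem lens_nonneg (lst : List Int) :
    ∀ y ∈ (pyGroups lst).filterMap
        (fun g => if g.1 then none else some ((g.2.length : Int))), 0 ≤ y := by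
  intro y hy
  rcases List.mem_filterMap.mp hy with ⟨gr, _, hgr⟩
  by_cases h : gr.1 <;> simp [h] at hgr
  omega

theorem B_char (lst : List Int) :
    g lst 0 =
      ((pyGroups lst).filterMap
        (fun g => if g.1 then none else some ((g.2.length : Int)))).foldl max 0 := by
  induction lst using pyGroups.induct with
  | case1 => simp [g, pyGroups]
  | case2 x xs ih =>
    rw [pyGroups]
    by_cases hx : x = 0
    · -- zero run: filtered out, and it does not change g from count 0
      have hall : ∀ y ∈ x :: xs.takeWhile (fun y => (y == 0) == (x == 0)), y = 0 := by
        intro y hy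
        rcases List.mem_cons.mp hy with rfl | hy
        · exact hx
        · have := List.mem_takeWhile_imp hy
          simpa [hx] using this
      have hsplit : x :: xs = (x :: xs.takeWhile (fun y => (y == 0) == (x == 0))) ++
          xs.dropWhile (fun y => (y == 0) == (x == 0)) := by
        simp [List.takeWhile_append_dropWhile]
      rw [List.filterMap_cons_none (by simp [hx]), ← ih]
      conv_lhs => rw [hsplit]
      exact g_zero_run _ hall _
    · -- non-zero run: its length enters the max
      have hall : ∀ y ∈ x :: xs.takeWhile (fun y => (y == 0) == (x == 0)), y ≠ 0 := by
        intro y hy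
        rcases List.mem_cons.mp hy with rfl | hy
        · exact hx
        · have := List.mem_takeWhile_imp hy
          simpa [hx] using this
      have hsplit : x :: xs = (x :: xs.takeWhile (fun y => (y == 0) == (x == 0))) ++
          xs.dropWhile (fun y => (y == 0) == (x == 0)) := by
        simp [List.takeWhile_append_dropWhile]
      have hd : xs.dropWhile (fun y => (y == 0) == (x == 0)) = [] ∨
          ∃ y ys, xs.dropWhile (fun y => (y == 0) == (x == 0)) = y :: ys ∧ y = 0 := by
        cases hcase : xs.dropWhile (fun y => (y == 0) == (x == 0)) with
        | nil => exact Or.inl rfl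
        | cons y ys =>
          refine Or.inr ⟨y, ys, rfl, ?_⟩
          have := head_dropWhile _ xs y ys hcase
          simpa [hx] using this
      have hm0 : (0 : Int) ≤ ((x :: xs.takeWhile (fun y => (y == 0) == (x == 0))).length : Int) := by
        positivity
      conv_lhs => rw [hsplit]
      rw [g_nonzero_run _ hall, g_split _ hd _ (by omega), ih]
      rw [List.filterMap_cons_some (by rw [if_neg (by simp [hx])])]
      rw [List.foldl_cons, max_comm (0 : Int), foldl_max_max, zero_add]

-- ===== VERDICT (by name: the statement is the Claim_ definition above) =====
theorem count_streak_spec : Claim_equal_count_streak := by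
  intro lst _
  unfold Spec_count_streak count_streak count_streak_alt
  simp only [foldA_eq lst 0 [], List.nil_append]
  have hnn : ∀ y ∈ gS lst 0 ++ [gC lst 0], 0 ≤ y := by
    intro y hy
    rcases List.mem_append.mp hy with h | h
    · exact gS_nonneg lst 0 le_rfl y h
    · simp only [List.mem_singleton] at h
      subst h
      exact gC_nonneg lst 0 le_rfl
  rw [max?getD_eq_foldl0 _ hnn, maxD_eq_foldl0 _ (lens_nonneg lst),
    A_char lst 0 le_rfl, B_char lst]
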